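-- pv_equiv track=rewrite | github.com/levinericzimmermann/ot3 | ot3/utilities/tools.py | not_fibonacci_transition
-- ===== SOURCE A (Python) =====
-- import functools
-- import operator
--
-- def make_growing_series_with_sum_n(requested_sum: int) -> tuple:
--     ls = []
--     add_idx = iter([])
--     while sum(ls) < requested_sum:
--         try:
--             ls[next(add_idx)] += 1
--         except StopIteration:
--             ls = [1] + ls
--             add_idx = reversed(tuple(range(len(ls))))
--     return tuple(ls)
--
-- def make_falling_series_with_sum_n(requested_sum: int) -> tuple:
--     return tuple(reversed(make_growing_series_with_sum_n(requested_sum)))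
--
-- def interlock_tuples(t0: tuple, t1: tuple) -> tuple:
--     size0, size1 = len(t0), len(t1)
--     difference = size0 - size1
--     indices = functools.reduce(
--         operator.add, ((0, 1) for n in range(min((size0, size1))))
--     )
--     if difference > 0:
--         indices = tuple(0 for i in range(difference)) + indices
--     else:
--         indices = indices + tuple(1 for i in range(abs(difference)))
--     t0_it = iter(t0)
--     t1_it = iter(t1)
--     return tuple(next(t0_it) if idx == 0 else next(t1_it) for idx in indices)
--
-- def not_fibonacci_transition(size0: int, size1: int, element0=0, element1=1) -> tuple:
--     def write_to_n_element(it, element) -> tuple: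
--         return tuple(tuple(element for n in range(x)) for x in it)
--
--     if size0 == 0 and size1 == 0:
--         return tuple([])
--
--     elif size0 == 0:
--         return tuple([element1 for n in range(size1)])
--
--     elif size1 == 0:
--         return tuple([element0 for n in range(size0)])
--
--     else:
--         return functools.reduce(
--             operator.add,
--             interlock_tuples(
--                 *tuple(
--                     write_to_n_element(s, el)
--                     for s, el in zip(
--                         (
--                             make_falling_series_with_sum_n(size0),
--                             make_growing_series_with_sum_n(size1),
--                         ),
--                         (element0, element1),
--                     )
--                 )
--             ),
--         )
-- ===== SOURCE B (Python) =====
-- import math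
--
-- def _series(n: int) -> list:
--     # growing series with sum n, closed form: n = m(m+1)/2 + r with 0 <= r <= m;
--     # the series is [1,2,...,m] with the last r entries bumped by 1.
--     m = (math.isqrt(8 * n + 1) - 1) // 2
--     r = n - m * (m + 1) // 2
--     return [i + 1 + (1 if m - r <= i else 0) for i in range(m)]
--
-- def not_fibonacci_transition(size0: int, size1: int, element0=0, element1=1) -> tuple:
--     if size0 == 0 and size1 == 0:
--         return tuple([])
--     if size0 == 0:
--         return (element1,) * size1
--     if size1 == 0:
--         return (element0,) * size0
--     f = _series(size0)[::-1]          # falling series for size0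
--     g = _series(size1)                # growing series for size1
--     out = []
--     i = j = 0
--     for _ in range(len(f) - len(g)):  # extra leading blocks from the longer falling side
--         out.extend([element0] * f[i]); i += 1
--     while i < len(f) and j < len(g):  # alternate remaining blocks pairwise
--         out.extend([element0] * f[i]); i += 1
--         out.extend([element1] * g[j]); j += 1
--     while j < len(g):                 # trailing blocks from the growing side
--         out.extend([element1] * g[j]); j += 1
--     return tuple(out)
-- ===== Notes on version B (the rewrite author's own statement) =====
-- stated objective: faster
-- what changed: B replaces A's iterator-driven simulation of the growing series (repeated sum() over a rebuilt list) by a closed form via isqrt, and replaces A's reduce-built index tuple plus iterator interlocking and O(k^2) reduce(add) concatenation by a single pass that extends one output list block by block.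
import Mathlib
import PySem

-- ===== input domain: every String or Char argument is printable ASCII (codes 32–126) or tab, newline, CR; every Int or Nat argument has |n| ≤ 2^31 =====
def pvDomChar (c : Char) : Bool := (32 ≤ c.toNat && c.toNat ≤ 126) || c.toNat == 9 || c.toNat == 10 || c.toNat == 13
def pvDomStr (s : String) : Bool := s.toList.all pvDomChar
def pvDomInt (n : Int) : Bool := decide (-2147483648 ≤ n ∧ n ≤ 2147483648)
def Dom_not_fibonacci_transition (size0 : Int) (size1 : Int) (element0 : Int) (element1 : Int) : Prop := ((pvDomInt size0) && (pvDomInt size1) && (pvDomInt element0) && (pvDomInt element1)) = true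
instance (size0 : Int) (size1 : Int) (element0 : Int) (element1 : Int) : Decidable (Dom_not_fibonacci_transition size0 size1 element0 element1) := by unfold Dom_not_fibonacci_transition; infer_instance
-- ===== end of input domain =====

-- B replaces A's iterative simulation of the growing series and its reduce-based tuple
-- concatenation by a closed-form series (integer square root) and a single block-appending pass.

-- ===== PORT A =====

-- the while-loop of make_growing_series_with_sum_n; state = (ls, remaining add_idx).
-- fuel is only a totality guard: each pass raises sum(ls) by exactly 1, so n.toNat
-- passes reach sum(ls) = n and fuel never runs out on the branch that is reached.
def pvGrowLoop : Nat → Int → List Int → List Nat → List Int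
  | 0, _, ls, _ => ls
  | fuel + 1, n, ls, [] =>
      if ls.sum < n then
        pvGrowLoop fuel n (1 :: ls) ((List.range (1 :: ls).length).reverse)
      else ls
  | fuel + 1, n, ls, i :: rest =>
      if ls.sum < n then
        if h : i < ls.length then pvGrowLoop fuel n (ls.set i (ls[i] + 1)) rest
        else ls  -- Python would raise IndexError; unreachable from the initial state ([], [])
      else ls

def pvGrow (n : Int) : List Int := pvGrowLoop n.toNat n [] []

-- write_to_n_element: tuple(tuple(element for n in range(x)) for x in it)
def pvWrite (element : Int) (it : List Int) : List (List Int) :=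
  it.map (fun x => (PySem.List.pyRange 0 x 1).map (fun _ => element))

-- functools.reduce(operator.add, l); reduce over an empty sequence raises TypeError
-- (unreachable in A's uses under Pre_), ported as []
def pvReduceAdd (l : List (List Int)) : List Int :=
  match l with
  | [] => []
  | h :: t => t.foldl (· ++ ·) h

-- tuple(next(t0_it) if idx == 0 else next(t1_it) for idx in indices); next() on an
-- exhausted iterator is unreachable in A's uses (the index counts match the lengths)
def pvConsume : List Int → List (List Int) → List (List Int) → List (List Int)
  | [], _, _ => []
  | idx :: rest, t0, t1 =>
    if idx = 0 then
      match t0 with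
      | [] => []
      | x :: t0' => x :: pvConsume rest t0' t1
    else
      match t1 with
      | [] => []
      | y :: t1' => y :: pvConsume rest t0 t1'

def pvInterlock (t0 t1 : List (List Int)) : List (List Int) :=
  let size0 := t0.length
  let size1 := t1.length
  let difference : Int := (size0 : Int) - (size1 : Int)
  let indices : List Int :=
    pvReduceAdd ((List.range (min size0 size1)).map (fun _ => [(0 : Int), 1]))
  let indices : List Int :=
    if difference > 0 then
      (PySem.List.pyRange 0 difference 1).map (fun _ => (0 : Int)) ++ indices
    else
      indices ++ (List.range difference.natAbs).map (fun _ => (1 : Int))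
  pvConsume indices t0 t1

def not_fibonacci_transition (size0 : Int) (size1 : Int) (element0 : Int) (element1 : Int) : List Int :=
  if size0 = 0 ∧ size1 = 0 then []
  else if size0 = 0 then (PySem.List.pyRange 0 size1 1).map (fun _ => element1)
  else if size1 = 0 then (PySem.List.pyRange 0 size0 1).map (fun _ => element0)
  else
    pvReduceAdd (pvInterlock (pvWrite element0 (pvGrow size0).reverse)
                             (pvWrite element1 (pvGrow size1)))

-- ===== PORT B =====

-- closed-form growing series with sum n (math.isqrt = Nat.sqrt)
def pvSeries (n : Int) : List Int :=
  let m : Int := PySem.Int.floordiv ((Nat.sqrt (8 * n + 1).toNat : Int) - 1) 2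
  let r : Int := n - PySem.Int.floordiv (m * (m + 1)) 2
  (PySem.List.pyRange 0 m 1).map (fun i => i + 1 + if m - r ≤ i then 1 else 0)

-- the leading `for _ in range(len(f) - len(g))` loop: returns (remaining f, out)
def pvLead (e0 : Int) : Nat → List Int → List Int → List Int × List Int
  | 0, f, out => (f, out)
  | _ + 1, [], out => ([], out)  -- unreachable: the loop count never exceeds len(f)
  | d + 1, x :: f, out => pvLead e0 d f (out ++ List.replicate x.toNat e0)

-- the trailing `while j < len(g)` loop
def pvTrail (e1 : Int) : List Int → List Int → List Int
  | [], out => out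
  | y :: g, out => pvTrail e1 g (out ++ List.replicate y.toNat e1)

-- the middle `while i < len(f) and j < len(g)` loop, then the trailing loop
def pvPair (e0 e1 : Int) : List Int → List Int → List Int → List Int
  | x :: f, y :: g, out =>
      pvPair e0 e1 f g (out ++ List.replicate x.toNat e0 ++ List.replicate y.toNat e1)
  | _, g, out => pvTrail e1 g out

def not_fibonacci_transition_alt (size0 : Int) (size1 : Int) (element0 : Int) (element1 : Int) : List Int :=
  if size0 = 0 ∧ size1 = 0 then []
  else if size0 = 0 then List.replicate size1.toNat element1
  else if size1 = 0 then List.replicate size0.toNat element0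
  else
    let f := (pvSeries size0).reverse
    let g := pvSeries size1
    let p := pvLead element0 (f.length - g.length) f []
    pvPair element0 element1 p.1 g p.2

-- ===== PRECONDITION & SPEC =====

-- A raises TypeError (reduce over an empty sequence) when exactly one size is negative
-- and the other nonzero; Pre_ admits every input on which A returns.
def Pre_not_fibonacci_transition (size0 : Int) (size1 : Int) (element0 : Int) (element1 : Int) : Prop :=
  size0 = 0 ∨ size1 = 0 ∨ (0 < size0 ∧ 0 < size1)
instance (size0 : Int) (size1 : Int) (element0 : Int) (element1 : Int) : Decidable (Pre_not_fibonacci_transition size0 size1 element0 element1) := by unfold Pre_not_fibonacci_transition; infer_instance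

def pvWitness_not_fibonacci_transition : Int × Int × Int × Int := (5, 7, 0, 1)

def Spec_not_fibonacci_transition (size0 : Int) (size1 : Int) (element0 : Int) (element1 : Int) (out : List Int) : Prop := out = not_fibonacci_transition_alt size0 size1 element0 element1
instance (size0 : Int) (size1 : Int) (element0 : Int) (element1 : Int) (out : List Int) : Decidable (Spec_not_fibonacci_transition size0 size1 element0 element1 out) := by unfold Spec_not_fibonacci_transition; infer_instance

-- ===== CLAIM (what is proved, stated in full; the proofs are below) =====
def Claim_equal_not_fibonacci_transition : Prop := ∀ (size0 : Int) (size1 : Int) (element0 : Int) (element1 : Int), Dom_not_fibonacci_transition size0 size1 element0 element1 → Pre_not_fibonacci_transition size0 size1 element0 element1 → Spec_not_fibonacci_transition size0 size1 element0 element1 (not_fibonacci_transition size0 size1 element0 element1)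

-- ===== LEMMAS AND PROOFS =====

-- ---- Part 1: the growing-series loop computes the closed-form series ----

-- each `ls[i] += 1` increases sum(ls) by exactly 1
theorem pv_sum_set_succ : ∀ (ls : List Int) (i : Nat) (h : i < ls.length),
    (ls.set i (ls[i] + 1)).sum = ls.sum + 1
  | _ :: _, 0, _ => by simp [List.sum_cons]; ring
  | a :: t, i + 1, h => by
      simp only [List.getElem_cons_succ, List.set_cons_succ, List.sum_cons,
        pv_sum_set_succ t i (by simpa using h)]
      ring

-- triangular numbers
def pvT : Nat → Nat
  | 0 => 0
  | m + 1 => pvT m + m + 1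

-- the loop state after pvT m + r steps (0 ≤ r ≤ m): the list and the remaining indices
def pvSer (m r : Nat) : List Int :=
  (List.range m).map (fun i : Nat => ((i : Int) + 1 + if m - r ≤ i then 1 else 0))

def pvIdx (m r : Nat) : List Nat := (List.range (m - r)).reverse

theorem pvT_le_of_lt {m M : Nat} (h : m < M) : pvT m + m + 1 ≤ pvT M := by
  induction M with
  | zero => omega
  | succ M ih =>
      rcases Nat.lt_succ_iff_lt_or_eq.mp h with h' | h'
      · have := ih h'; simp [pvT]; omega
      · subst h'; simp [pvT]

theorem pvT_repr_unique {m r M R : Nat} (hr : r ≤ m) (hR : R ≤ M)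
    (h : pvT m + r = pvT M + R) : m = M ∧ r = R := by
  rcases lt_trichotomy m M with hlt | heq | hgt
  · have := pvT_le_of_lt hlt; omega
  · subst heq; omega
  · have := pvT_le_of_lt hgt; omega

theorem pvSer_step {m r : Nat} (hrm : r < m) (h : m - r - 1 < (pvSer m r).length) :
    (pvSer m r).set (m - r - 1) ((pvSer m r)[m - r - 1] + 1) = pvSer m (r + 1) := by
  apply List.ext_getElem (by simp [pvSer])
  intro j hj1 hj2
  have hjm : j < m := by simpa [pvSer] using hj1
  simp only [pvSer, List.getElem_set, List.getElem_map, List.getElem_range]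
  by_cases hje : m - r - 1 = j
  · rw [if_pos hje]
    subst hje
    rw [if_neg (by omega : ¬ (m - r ≤ m - r - 1)), if_pos (by omega : m - (r + 1) ≤ m - r - 1)]
    ring
  · rw [if_neg hje]
    by_cases hc : m - r ≤ j
    · rw [if_pos hc, if_pos (by omega : m - (r + 1) ≤ j)]
    · rw [if_neg hc, if_neg (by omega : ¬ (m - (r + 1) ≤ j))]

theorem pvIdx_step {m r : Nat} (hrm : r < m) :
    pvIdx m r = (m - r - 1) :: pvIdx m (r + 1) := by
  have h1 : m - r = (m - r - 1) + 1 := by omega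
  have h2 : m - (r + 1) = m - r - 1 := by omega
  rw [pvIdx, pvIdx, h1, h2, List.range_succ, List.reverse_append]
  simp

theorem pvSer_prepend (m : Nat) : 1 :: pvSer m m = pvSer (m + 1) 0 := by
  apply List.ext_getElem (by simp [pvSer])
  intro j hj1 hj2
  have hjm : j < m + 1 := by simpa [pvSer] using hj2
  cases j with
  | zero =>
      simp only [List.getElem_cons_zero, pvSer, List.getElem_map, List.getElem_range]
      rw [if_neg (by omega : ¬ (m + 1 - 0 ≤ 0))]
      norm_num
  | succ j =>
      simp only [List.getElem_cons_succ, pvSer, List.getElem_map, List.getElem_range]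
      rw [if_pos (by omega : m - m ≤ j), if_neg (by omega : ¬ (m + 1 - 0 ≤ j + 1))]
      push_cast
      ring

theorem pvSer_length (m r : Nat) : (pvSer m r).length = m := by simp [pvSer]

theorem pvSer_zero (m : Nat) : pvSer m 0 = (List.range m).map (fun i : Nat => ((i : Int) + 1)) := by
  rw [pvSer]
  apply List.map_congr_left
  intro i hi
  rw [if_neg (by simp at hi; omega : ¬ (m - 0 ≤ i))]
  ring

theorem pvSer_sum0 (m : Nat) : ((List.range m).map (fun i : Nat => ((i : Int) + 1))).sum = pvT m := by
  induction m with
  | zero => simp [pvT]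
  | succ m ih =>
      rw [List.range_succ, List.map_append, List.sum_append, ih]
      simp [pvT]
      push_cast
      ring

theorem pvSer_sum {m : Nat} : ∀ {r : Nat}, r ≤ m → (pvSer m r).sum = (pvT m : Int) + r := by
  intro r
  induction r with
  | zero => intro _; rw [pvSer_zero, pvSer_sum0]; simp
  | succ r ih =>
      intro h
      have hrm : r < m := by omega
      have hlen : m - r - 1 < (pvSer m r).length := by rw [pvSer_length]; omega
      rw [← pvSer_step hrm hlen, pv_sum_set_succ _ _ hlen, ih (by omega)]
      push_cast
      ring

theorem pv_grow_loop_eq (M R : Nat) (hR : R ≤ M) :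
    ∀ (fuel m r : Nat), r ≤ m → pvT m + r + fuel = pvT M + R →
      pvGrowLoop fuel ((pvT M : Int) + (R : Int)) (pvSer m r) (pvIdx m r) = pvSer M R := by
  intro fuel
  induction fuel with
  | zero =>
      intro m r hr heq
      obtain ⟨hm, hr'⟩ := pvT_repr_unique hr hR (by omega)
      rw [hm, hr']
      rfl
  | succ fuel ih =>
      intro m r hr heq
      rcases Nat.lt_or_ge r m with hrm | hrm
      · rw [pvIdx_step hrm, pvGrowLoop]
        rw [if_pos (by rw [pvSer_sum hr]; push_cast; omega)]
        rw [dif_pos (show m - r - 1 < (pvSer m r).length by rw [pvSer_length]; omega)]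
        rw [pvSer_step hrm (by rw [pvSer_length]; omega)]
        exact ih m (r + 1) (by omega) (by omega)
      · have hrm' : r = m := by omega
        rw [hrm', show pvIdx m m = [] by simp [pvIdx], pvGrowLoop]
        rw [if_pos (by rw [pvSer_sum (le_refl m)]; push_cast; omega)]
        rw [show (1 :: pvSer m m).length = m + 1 by simp [pvSer_length]]
        rw [show (List.range (m + 1)).reverse = pvIdx (m + 1) 0 from by simp [pvIdx]]
        rw [pvSer_prepend]
        exact ih (m + 1) 0 (by omega)
          (by have : pvT (m + 1) = pvT m + m + 1 := rfl; omega)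

theorem pvT_double (m : Nat) : 2 * pvT m = m * (m + 1) := by
  induction m with
  | zero => simp [pvT]
  | succ m ih => simp [pvT]; ring_nf; ring_nf at ih; omega

-- the Nat.sqrt bracket: pvSeries really is the unique (m, r) representation
theorem pv_sqrt_repr (n : Nat) :
    pvT ((Nat.sqrt (8 * n + 1) - 1) / 2) ≤ n ∧
    n ≤ pvT ((Nat.sqrt (8 * n + 1) - 1) / 2) + (Nat.sqrt (8 * n + 1) - 1) / 2 := by
  set s := Nat.sqrt (8 * n + 1) with hs
  have h1 : s * s ≤ 8 * n + 1 := by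
    have h := Nat.sqrt_le' (8 * n + 1)
    rw [pow_two] at h
    exact h
  have h2 : 8 * n + 1 < (s + 1) * (s + 1) := by
    have h := Nat.lt_succ_sqrt' (8 * n + 1)
    rw [pow_two] at h
    exact h
  have hs1 : 1 ≤ s := by
    have h := Nat.sqrt_le_sqrt (show 1 ≤ 8 * n + 1 by omega)
    simpa [hs] using h
  set M := (s - 1) / 2 with hM
  have hdm := Nat.div_add_mod (s - 1) 2
  have hmod : (s - 1) % 2 < 2 := Nat.mod_lt _ (by omega)
  have hlo : 2 * M + 1 ≤ s := by omega
  have hhi : s ≤ 2 * M + 2 := by omega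
  have hT := pvT_double M
  have hsq1 : (2 * M + 1) * (2 * M + 1) ≤ s * s := Nat.mul_le_mul hlo hlo
  have hsq2 : (s + 1) * (s + 1) ≤ (2 * M + 3) * (2 * M + 3) :=
    Nat.mul_le_mul (by omega) (by omega)
  have he1 : (2 * M + 1) * (2 * M + 1) = 4 * (M * (M + 1)) + 1 := by ring
  have he2 : (2 * M + 3) * (2 * M + 3) = 4 * (M * (M + 1)) + 8 * M + 9 := by ring
  constructor
  · nlinarith
  · nlinarith

theorem pvSeries_eq_pvSer (n : Nat) :
    pvSeries (n : Int) =
      pvSer ((Nat.sqrt (8 * n + 1) - 1) / 2) (n - pvT ((Nat.sqrt (8 * n + 1) - 1) / 2)) := by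
  have hto : (8 * (n : Int) + 1).toNat = 8 * n + 1 := by omega
  set s := Nat.sqrt (8 * n + 1) with hs
  have hs1 : 1 ≤ s := by
    have h := Nat.sqrt_le_sqrt (show 1 ≤ 8 * n + 1 by omega)
    simpa [hs] using h
  set M := (s - 1) / 2 with hM
  set R := n - pvT M with hR
  have hrepr := pv_sqrt_repr n
  rw [← hs, ← hM] at hrepr
  have hRM : R ≤ M := by omega
  rw [pvSeries]
  have hcast : ((Nat.sqrt (8 * (n : Int) + 1).toNat : Int) - 1) = ((s - 1 : Nat) : Int) := by
    rw [hto, ← hs]; omega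
  rw [hcast]
  have hm : PySem.Int.floordiv ((s - 1 : Nat) : Int) 2 = (M : Int) := by
    exact_mod_cast PySem.Int.floordiv_natCast (s - 1) 2
  rw [hm]
  have hmul : (M : Int) * ((M : Int) + 1) = ((M * (M + 1) : Nat) : Int) := by push_cast; ring
  have hTd := pvT_double M
  have hr : (n : Int) - PySem.Int.floordiv ((M : Int) * ((M : Int) + 1)) 2 = (R : Int) := by
    rw [hmul]
    rw [show PySem.Int.floordiv ((M * (M + 1) : Nat) : Int) 2 = ((M * (M + 1) / 2 : Nat) : Int) from
      by exact_mod_cast PySem.Int.floordiv_natCast (M * (M + 1)) 2]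
    have : M * (M + 1) / 2 = pvT M := by omega
    rw [this]
    omega
  rw [hr]
  rw [PySem.List.pyRange_one]
  rw [show (((M : Int)) - 0).toNat = M by omega]
  rw [pvSer, List.map_map]
  apply List.map_congr_left
  intro k hk
  have hkM : k < M := List.mem_range.mp hk
  simp only [Function.comp_apply]
  by_cases hc : M - R ≤ k
  · rw [if_pos (by omega : (M : Int) - (R : Int) ≤ 0 + (k : Int)), if_pos hc]
    push_cast; ring
  · rw [if_neg (by omega : ¬ ((M : Int) - (R : Int) ≤ 0 + (k : Int))), if_neg hc]
    push_cast; ring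

theorem pvGrow_eq_pvSeries (n : Nat) : pvGrow (n : Int) = pvSeries (n : Int) := by
  set M := (Nat.sqrt (8 * n + 1) - 1) / 2 with hM
  set R := n - pvT M with hR
  have hrepr := pv_sqrt_repr n
  rw [← hM] at hrepr
  have hRM : R ≤ M := by omega
  rw [pvSeries_eq_pvSer n, ← hM, ← hR]
  have hn : (n : Int) = (pvT M : Int) + (R : Int) := by omega
  have hfuel : ((n : Int)).toNat = pvT M + R := by omega
  have h0 : pvGrow (n : Int) =
      pvGrowLoop (pvT M + R) ((pvT M : Int) + (R : Int)) (pvSer 0 0) (pvIdx 0 0) := by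
    rw [pvGrow, hfuel, ← hn]; rfl
  rw [h0]
  exact pv_grow_loop_eq M R hRM (pvT M + R) 0 0 (le_refl 0)
    (by have : pvT 0 = 0 := rfl; omega)

-- ---- Part 2: interlock + reduce(add) = the single block-appending pass ----

-- the common block structure both sides flatten to
def pvMix (e0 e1 : Int) : List Int → List Int → List Int
  | x :: f, y :: g =>
      List.replicate x.toNat e0 ++ List.replicate y.toNat e1 ++ pvMix e0 e1 f g
  | [], g => (g.map (fun y => List.replicate y.toNat e1)).flatten
  | _ :: _, [] => []

theorem pv_pyRange_map_const (z e : Int) :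
    (PySem.List.pyRange 0 z 1).map (fun _ => e) = List.replicate z.toNat e := by
  rw [PySem.List.pyRange_one, List.map_map]
  rw [show ((z : Int) - 0).toNat = z.toNat by omega]
  simp [Function.comp_def]

theorem pv_foldl_append (t : List (List Int)) :
    ∀ acc : List Int, t.foldl (· ++ ·) acc = acc ++ t.flatten := by
  induction t with
  | nil => simp
  | cons h t ih => intro acc; simp [List.foldl_cons, ih]

theorem pvReduceAdd_eq_flatten (l : List (List Int)) : pvReduceAdd l = l.flatten := by
  cases l with
  | nil => rfl
  | cons h t => simp [pvReduceAdd, pv_foldl_append]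

theorem pvConsume_zero (rest : List Int) (x : List Int) (t0 t1 : List (List Int)) :
    pvConsume ((0 : Int) :: rest) (x :: t0) t1 = x :: pvConsume rest t0 t1 := by
  simp [pvConsume]

theorem pvConsume_one (rest : List Int) (t0 : List (List Int)) (y : List Int)
    (t1 : List (List Int)) :
    pvConsume ((1 : Int) :: rest) t0 (y :: t1) = y :: pvConsume rest t0 t1 := by
  norm_num [pvConsume]

theorem pv_consume_zeros :
    ∀ (t0a : List (List Int)) (rest : List Int) (t0b t1 : List (List Int)),
      pvConsume (List.replicate t0a.length (0 : Int) ++ rest) (t0a ++ t0b) t1 =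
        t0a ++ pvConsume rest t0b t1 := by
  intro t0a
  induction t0a with
  | nil => intro rest t0b t1; simp
  | cons x t ih =>
      intro rest t0b t1
      simp only [List.length_cons, List.replicate_succ, List.cons_append, pvConsume_zero]
      rw [ih]

theorem pv_consume_pairs :
    ∀ (t0 t1 : List (List Int)) (rest : List Int), t0.length ≤ t1.length →
      pvConsume ((List.replicate t0.length [(0 : Int), 1]).flatten ++ rest) t0 t1 =
        (t0.zip t1).flatMap (fun p => [p.1, p.2]) ++
          pvConsume rest [] (t1.drop t0.length) := by
  intro t0
  induction t0 with
  | nil => intro t1 rest _; simp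
  | cons x f ih =>
      intro t1 rest h
      cases t1 with
      | nil => simp at h
      | cons y g =>
          simp only [List.length_cons, List.replicate_succ, List.flatten_cons,
            List.cons_append, List.nil_append, List.append_assoc, pvConsume_zero,
            pvConsume_one, List.zip_cons_cons, List.flatMap_cons, List.drop_succ_cons]
          rw [ih g rest (by simpa using h)]

theorem pv_consume_ones :
    ∀ (t1 t0 : List (List Int)), pvConsume (List.replicate t1.length (1 : Int)) t0 t1 = t1 := by
  intro t1
  induction t1 with
  | nil => intro t0; simp [pvConsume]
  | cons y g ih =>
      intro t0
      simp only [List.length_cons, List.replicate_succ, pvConsume_one]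
      rw [ih]

theorem pvTrail_eq (e1 : Int) :
    ∀ (g out : List Int),
      pvTrail e1 g out = out ++ (g.map (fun y => List.replicate y.toNat e1)).flatten := by
  intro g
  induction g with
  | nil => intro out; simp [pvTrail]
  | cons y g ih =>
      intro out
      rw [show pvTrail e1 (y :: g) out = pvTrail e1 g (out ++ List.replicate y.toNat e1) from rfl,
        ih]
      simp [List.append_assoc]

theorem pvPair_eq (e0 e1 : Int) :
    ∀ (f g out : List Int), pvPair e0 e1 f g out = out ++ pvMix e0 e1 f g := by
  intro f
  induction f with
  | nil =>
      intro g out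
      rw [show pvPair e0 e1 [] g out = pvTrail e1 g out from rfl, pvTrail_eq]
      rfl
  | cons x f ih =>
      intro g out
      cases g with
      | nil =>
          rw [show pvPair e0 e1 (x :: f) [] out = pvTrail e1 [] out from rfl]
          rw [show pvTrail e1 [] out = out from rfl]
          rw [show pvMix e0 e1 (x :: f) [] = [] from rfl]
          simp
      | cons y g =>
          rw [show pvPair e0 e1 (x :: f) (y :: g) out =
                pvPair e0 e1 f g (out ++ List.replicate x.toNat e0 ++ List.replicate y.toNat e1)
              from rfl, ih]
          rw [show pvMix e0 e1 (x :: f) (y :: g) =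
                List.replicate x.toNat e0 ++ List.replicate y.toNat e1 ++ pvMix e0 e1 f g
              from rfl]
          simp [List.append_assoc]

theorem pvLead_eq (e0 : Int) :
    ∀ (d : Nat) (f out : List Int), d ≤ f.length →
      pvLead e0 d f out =
        (f.drop d, out ++ ((f.take d).map (fun x => List.replicate x.toNat e0)).flatten) := by
  intro d
  induction d with
  | zero => intro f out _; simp [pvLead]
  | succ d ih =>
      intro f out h
      cases f with
      | nil => simp at h
      | cons x f =>
          rw [show pvLead e0 (d + 1) (x :: f) out =
                pvLead e0 d f (out ++ List.replicate x.toNat e0) from rfl,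
            ih f _ (by simpa using h)]
          simp [List.append_assoc]

theorem pvMix_eq_flatten (e0 e1 : Int) :
    ∀ (f g : List Int), f.length ≤ g.length →
      ((( (f.map (fun x => List.replicate x.toNat e0)).zip
            (g.map (fun y => List.replicate y.toNat e1))).flatMap (fun p => [p.1, p.2])) ++
        (g.drop f.length).map (fun y => List.replicate y.toNat e1)).flatten =
        pvMix e0 e1 f g := by
  intro f
  induction f with
  | nil => intro g _; simp [pvMix]
  | cons x f ih =>
      intro g h
      cases g with
      | nil => simp at h
      | cons y g =>
          rw [show pvMix e0 e1 (x :: f) (y :: g) =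
                List.replicate x.toNat e0 ++ List.replicate y.toNat e1 ++ pvMix e0 e1 f g
              from rfl, ← ih g (by simpa using h)]
          simp [List.append_assoc]

-- the whole pipeline, for arbitrary series lists F G
theorem pvWrite_eq (e : Int) (l : List Int) :
    pvWrite e l = l.map (fun x => List.replicate x.toNat e) := by
  rw [pvWrite]
  apply List.map_congr_left
  intro x _
  exact pv_pyRange_map_const x e

theorem pv_base_indices (k : Nat) :
    pvReduceAdd ((List.range k).map (fun _ => [(0 : Int), 1])) =
      (List.replicate k [(0 : Int), 1]).flatten := by
  rw [pvReduceAdd_eq_flatten, List.map_const']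
  simp

theorem pv_combine (e0 e1 : Int) (F G : List Int) :
    pvReduceAdd (pvInterlock (pvWrite e0 F) (pvWrite e1 G)) =
      (((F.take (F.length - G.length)).map (fun x => List.replicate x.toNat e0)).flatten ++
        pvMix e0 e1 (F.drop (F.length - G.length)) G) := by
  rw [pvWrite_eq, pvWrite_eq]
  simp only [pvInterlock, List.length_map]
  set rep0 : Int → List Int := fun x => List.replicate x.toNat e0 with hrep0
  set rep1 : Int → List Int := fun y => List.replicate y.toNat e1 with hrep1
  set L0 := F.length with hL0
  set L1 := G.length with hL1
  by_cases hd : ((L0 : Int) - (L1 : Int)) > 0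
  · rw [if_pos hd]
    have hL : L1 < L0 := by omega
    set d := L0 - L1 with hdd
    rw [pv_base_indices, show min L0 L1 = L1 by omega]
    rw [pv_pyRange_map_const]
    rw [show ((L0 : Int) - (L1 : Int)).toNat = d by omega]
    have hsplit : F.map rep0 = (F.take d).map rep0 ++ (F.drop d).map rep0 := by
      rw [← List.map_append, List.take_append_drop]
    rw [hsplit]
    have htlen : ((F.take d).map rep0).length = d := by
      simp [List.length_take]; omega
    rw [show List.replicate d (0 : Int) =
          List.replicate ((F.take d).map rep0).length (0 : Int) by rw [htlen]]
    rw [pv_consume_zeros]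
    have hdlen : ((F.drop d).map rep0).length = L1 := by
      simp [List.length_drop]; omega
    have hglen : (G.map rep1).length = L1 := by rw [List.length_map, hL1]
    rw [show (List.replicate L1 [(0 : Int), 1]).flatten =
          (List.replicate ((F.drop d).map rep0).length [(0 : Int), 1]).flatten ++ [] by
        rw [hdlen]; simp]
    rw [pv_consume_pairs _ _ _ (by rw [hdlen, hglen])]
    rw [show pvConsume [] [] ((G.map rep1).drop ((F.drop d).map rep0).length) = [] from rfl]
    rw [pvReduceAdd_eq_flatten, List.flatten_append, List.append_nil]
    congr 1
    rw [← pvMix_eq_flatten e0 e1 (F.drop d) G (by simp [List.length_drop]; omega)]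
    rw [show G.drop ((F.drop d).length) = [] by
      apply List.drop_eq_nil_of_le; simp [List.length_drop]; omega]
    simp [hrep0, hrep1, ← List.map_drop]
  · rw [if_neg hd]
    have hL : L0 ≤ L1 := by omega
    have hd0 : L0 - L1 = 0 := by omega
    rw [pv_base_indices, show min L0 L1 = L0 by omega]
    have hflen : (F.map rep0).length = L0 := by rw [List.length_map, hL0]
    rw [show (List.range (((L0 : Int) - (L1 : Int)).natAbs)).map (fun _ => (1 : Int)) =
          List.replicate ((G.map rep1).drop ((F.map rep0).length)).length (1 : Int) by
        rw [List.map_const', List.length_range]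
        congr 1
        simp only [List.length_drop, List.length_map]
        omega]
    rw [show (List.replicate L0 [(0 : Int), 1]).flatten =
          (List.replicate ((F.map rep0).length) [(0 : Int), 1]).flatten by rw [hflen]]
    rw [pv_consume_pairs _ _ _ (by simp only [List.length_map]; omega)]
    rw [pv_consume_ones]
    rw [pvReduceAdd_eq_flatten]
    rw [hd0]
    simp only [List.take_zero, List.map_nil, List.flatten_nil, List.drop_zero,
      List.nil_append]
    rw [← pvMix_eq_flatten e0 e1 F G hL]
    rw [hflen, ← hL0, ← List.map_drop]

-- ===== VERDICT (by name: the statement is the Claim_ definition above) =====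
theorem not_fibonacci_transition_spec : Claim_equal_not_fibonacci_transition := by
  intro size0 size1 element0 element1 _ hpre
  unfold Spec_not_fibonacci_transition
  unfold not_fibonacci_transition not_fibonacci_transition_alt
  by_cases h00 : size0 = 0 ∧ size1 = 0
  · rw [if_pos h00, if_pos h00]
  · rw [if_neg h00, if_neg h00]
    by_cases h0 : size0 = 0
    · rw [if_pos h0, if_pos h0]
      exact pv_pyRange_map_const size1 element1
    · rw [if_neg h0, if_neg h0]
      by_cases h1 : size1 = 0
      · rw [if_pos h1, if_pos h1]
        exact pv_pyRange_map_const size0 element0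
      · rw [if_neg h1, if_neg h1]
        obtain ⟨hs0, hs1⟩ : 0 < size0 ∧ 0 < size1 := by
          rcases hpre with h | h | h
          · exact absurd h h0
          · exact absurd h h1
          · exact h
        obtain ⟨n0, rfl⟩ : ∃ n0 : Nat, size0 = (n0 : Int) := ⟨size0.toNat, by omega⟩
        obtain ⟨n1, rfl⟩ : ∃ n1 : Nat, size1 = (n1 : Int) := ⟨size1.toNat, by omega⟩
        rw [pvGrow_eq_pvSeries n0, pvGrow_eq_pvSeries n1]
        rw [pv_combine element0 element1 (pvSeries (n0 : Int)).reverse (pvSeries (n1 : Int))]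
        show _ =
          pvPair element0 element1
            (pvLead element0 ((pvSeries (n0 : Int)).reverse.length - (pvSeries (n1 : Int)).length)
              (pvSeries (n0 : Int)).reverse []).1
            (pvSeries (n1 : Int))
            (pvLead element0 ((pvSeries (n0 : Int)).reverse.length - (pvSeries (n1 : Int)).length)
              (pvSeries (n0 : Int)).reverse []).2
        rw [pvLead_eq element0 _ _ [] (Nat.sub_le _ _), pvPair_eq]
        simp
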